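-- pv_equiv track=rewrite | github.com/nastyh/LeetCode | Basic Data Structures/longest_word_in_dictionary_ii.py | longestWordWithPath
-- ===== SOURCE A (Python) =====
-- def longestWordWithPath(words):
--     """
--     O(nlong) + O(L) --> O(L), L is the sum of lenghts of all words
--     O(n), word_set contains all the words that are buildable
--     allowing character insertions at any position to construct the longest word.
--     It also returns the construction path of the longest word, showing the sequence of words used.
--     """
--     words.sort()  # Sort words lexicographically
--     word_set = set()  # To keep track of buildable words
--     path = []  # To store the construction path
--
--     for word in words:
--         # A word is buildable if any of its prefixes exist in word_set or if it has length 1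
--         if len(word) == 1 or any(word[:i] in word_set for i in range(1, len(word))):
--             word_set.add(word)
--             path.append(word)
--
--     return path
-- ===== SOURCE B (Python) =====
-- def longestWordWithPath(words):
--     words.sort()  # sorted in place, same as the original
--     trie = {}  # char -> [is_word_end, children]
--     path = []
--     for word in words:
--         if len(word) == 1 or _ends_before(trie, word):
--             _insert(trie, word)
--             path.append(word)
--     return path
--
--
-- def _ends_before(trie, word):
--     # True iff some buildable word already in the trie is a proper, non-empty
--     # prefix of `word` (an end-of-word mark strictly before word's last char).
--     node = trie
--     for ch in word[:-1]:
--         entry = node.get(ch)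
--         if entry is None:
--             return False
--         if entry[0]:
--             return True
--         node = entry[1]
--     return False
--
--
-- def _insert(trie, word):
--     node = trie
--     for ch in word[:-1]:
--         entry = node.get(ch)
--         if entry is None:
--             entry = [False, {}]
--             node[ch] = entry
--         node = entry[1]
--     last = node.get(word[-1])
--     if last is None:
--         node[word[-1]] = [True, {}]
--     else:
--         last[0] = True
-- ===== Notes on version B (the rewrite author's own statement) =====
-- stated objective: alternative
-- what changed: A probes every sliced prefix of each word against a hash set of buildable words; B instead maintains an incremental first-child/next-sibling trie of the buildable words and walks each word once, stopping at the first end-of-word mark, so no prefix slices are materialised.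
import Mathlib
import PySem

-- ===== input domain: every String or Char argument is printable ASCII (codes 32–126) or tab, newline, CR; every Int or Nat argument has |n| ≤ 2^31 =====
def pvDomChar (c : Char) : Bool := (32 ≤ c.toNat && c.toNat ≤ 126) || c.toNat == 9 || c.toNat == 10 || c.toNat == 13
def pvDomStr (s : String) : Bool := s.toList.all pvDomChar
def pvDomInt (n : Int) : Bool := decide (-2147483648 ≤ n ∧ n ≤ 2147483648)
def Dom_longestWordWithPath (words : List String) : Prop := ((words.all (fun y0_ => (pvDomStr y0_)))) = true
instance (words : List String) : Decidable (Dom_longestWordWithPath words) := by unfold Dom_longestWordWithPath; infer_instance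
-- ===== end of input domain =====

-- B replaces A's per-word scan over all sliced prefixes probed against a hash set by an
-- incremental trie of the buildable words (walk each word once, stop at the first
-- end-of-word mark); objective: alternative algorithm, same return value. Both A and B
-- sort the argument list in place in Python (the same observable side effect); the
-- equivalence proved here is about the return value.

-- ===== PORT A =====
def longestWordWithPath (words : List String) : List String :=
  -- words.sort(); then one pass maintaining (word_set, path)
  let ws := PySem.List.sorted words (fun w => w)
  (ws.foldl
    (fun (st : PySem.Set String × List String) word =>
      if PySem.Str.len word == 1
         || (PySem.List.pyRange 1 (PySem.Str.len word)).any
              (fun i => PySem.Set.contains st.1 (PySem.Str.slice word none (some i)))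
      then (PySem.Set.add st.1 word, st.2 ++ [word])
      else st)
    (PySem.Set.empty, [])).2

-- ===== PORT B =====
-- first-child / next-sibling trie: a Python children dict becomes the sibling chain
inductive PvTrie where
  | nil : PvTrie
  | node : Char → Bool → PvTrie → PvTrie → PvTrie
deriving DecidableEq, Repr

-- node.get(ch): scan the sibling chain for ch
def pvFind : PvTrie → Char → Option (Bool × PvTrie)
  | .nil, _ => none
  | .node c e ch s, d => if d = c then some (e, ch) else pvFind s d

-- the loop of _ends_before over word[:-1]: stop at a missing child or an end mark
def pvWalk : PvTrie → List Char → Bool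
  | _, [] => false
  | t, c :: rest =>
    match pvFind t c with
    | none => false
    | some (e, ch) => if e then true else pvWalk ch rest

def pvEndsBefore (t : PvTrie) (w : String) : Bool := pvWalk t w.toList.dropLast

-- the fresh nodes _insert creates once it has left the existing trie ([False, {}] …, final True)
def pvChain : List Char → PvTrie
  | [] => .nil
  | [c] => .node c true .nil .nil
  | c :: rest => .node c false (pvChain rest) .nil

-- _insert: descend (creating nodes) along word[:-1], then mark word[-1] as an end
def pvInsert : PvTrie → List Char → PvTrie
  | t, [] => t
  | .nil, c :: rest => pvChain (c :: rest)
  | .node c' e ch s, c :: rest =>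
    if c = c' then
      if rest = [] then .node c' true ch s
      else .node c' e (pvInsert ch rest) s
    else .node c' e ch (pvInsert s (c :: rest))
termination_by t w => (w.length, sizeOf t)

def longestWordWithPath_alt (words : List String) : List String :=
  let ws := PySem.List.sorted words (fun w => w)
  (ws.foldl
    (fun (st : PvTrie × List String) word =>
      if PySem.Str.len word == 1 || pvEndsBefore st.1 word
      then (pvInsert st.1 word.toList, st.2 ++ [word])
      else st)
    (.nil, [])).2

-- ===== PRECONDITION & SPEC =====
def Spec_longestWordWithPath (words : List String) (out : List String) : Prop := out = longestWordWithPath_alt words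
instance (words : List String) (out : List String) : Decidable (Spec_longestWordWithPath words out) := by unfold Spec_longestWordWithPath; infer_instance

-- ===== CLAIM (what is proved, stated in full; the proofs are below) =====
def Claim_equal_longestWordWithPath : Prop := ∀ (words : List String), Dom_longestWordWithPath words → Spec_longestWordWithPath words (longestWordWithPath words)

-- ===== LEMMAS AND PROOFS =====

-- "w was inserted into the trie": an end mark sits exactly at the path w
def pvMem : PvTrie → List Char → Bool
  | _, [] => false
  | t, c :: rest =>
    match pvFind t c with
    | none => false
    | some (e, ch) => if rest = [] then e else pvMem ch rest

theorem pvMem_nil (w : List Char) : pvMem .nil w = false := by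
  cases w <;> simp [pvMem, pvFind]

theorem pvMem_chain (v : List Char) (hv : v ≠ []) :
    ∀ w, pvMem (pvChain v) w = decide (w = v) := by
  induction v with
  | nil => exact absurd rfl hv
  | cons c rest ih =>
    intro w
    cases rest with
    | nil =>
      cases w with
      | nil => simp [pvMem]
      | cons d wr =>
        by_cases hd : d = c
        · subst hd; cases wr <;> simp [pvChain, pvMem, pvFind]
        · simp [pvChain, pvMem, pvFind, hd]
    | cons c2 r2 =>
      cases w with
      | nil => simp [pvMem]
      | cons d wr =>
        by_cases hd : d = c
        · subst hd
          cases wr with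
          | nil => simp [pvChain, pvMem, pvFind]
          | cons x xs =>
            have h := ih (by simp) (x :: xs)
            simp only [pvMem] at h
            simp [pvChain, pvMem, pvFind, h]
        · simp [pvChain, pvMem, pvFind, hd]

theorem pvMem_insert (t : PvTrie) (v : List Char) (hv : v ≠ []) :
    ∀ w, pvMem (pvInsert t v) w = (decide (w = v) || pvMem t w) := by
  induction t, v using pvInsert.induct with
  | case1 t => exact absurd rfl hv
  | case2 c rest =>
    intro w
    rw [pvInsert.eq_2, pvMem_chain (c :: rest) (by simp), pvMem_nil, Bool.or_false]
  | case3 e ch s c =>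
    intro w
    rw [pvInsert.eq_3]
    cases w with
    | nil => simp [pvMem]
    | cons d wr =>
      by_cases hd : d = c
      · subst hd; cases wr <;> simp [pvMem, pvFind]
      · simp [pvMem, pvFind, hd]
  | case4 e ch s c rest hr ih =>
    intro w
    rw [pvInsert.eq_3]
    simp only [if_neg hr, if_true]
    cases w with
    | nil => simp [pvMem]
    | cons d wr =>
      by_cases hd : d = c
      · subst hd
        cases wr with
        | nil => simp [pvMem, pvFind, (Ne.symm hr : [] ≠ rest)]
        | cons x xs =>
          have hL : pvMem (PvTrie.node d e (pvInsert ch rest) s) (d :: x :: xs)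
              = pvMem (pvInsert ch rest) (x :: xs) := by simp [pvMem, pvFind]
          have hR : pvMem (PvTrie.node d e ch s) (d :: x :: xs) = pvMem ch (x :: xs) := by
            simp [pvMem, pvFind]
          rw [hL, hR, ih hr (x :: xs)]
          simp
      · simp [pvMem, pvFind, hd]
  | case5 c' e ch s c rest hc ih =>
    intro w
    rw [pvInsert.eq_3, if_neg hc]
    cases w with
    | nil => simp [pvMem]
    | cons d wr =>
      by_cases hd : d = c'
      · subst hd
        simp [pvMem, pvFind, Ne.symm hc]
      · have hL : pvMem (PvTrie.node c' e ch (pvInsert s (c :: rest))) (d :: wr)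
            = pvMem (pvInsert s (c :: rest)) (d :: wr) := by simp [pvMem, pvFind, hd]
        have hR : pvMem (PvTrie.node c' e ch s) (d :: wr) = pvMem s (d :: wr) := by
          simp [pvMem, pvFind, hd]
        rw [hL, hR, ih hv (d :: wr)]

theorem pvWalk_iff (u : List Char) : ∀ t,
    (pvWalk t u = true ↔ ∃ k : Nat, 1 ≤ k ∧ k ≤ u.length ∧ pvMem t (u.take k) = true) := by
  induction u with
  | nil =>
    intro t
    simp only [pvWalk, List.length_nil]
    constructor
    · intro h; cases h
    · rintro ⟨k, hk1, hk2, -⟩; omega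
  | cons c rest ih =>
    intro t
    rw [show pvWalk t (c :: rest)
        = (match pvFind t c with
           | none => false
           | some (e, ch) => if e then true else pvWalk ch rest) from rfl]
    cases hf : pvFind t c with
    | none =>
      constructor
      · intro h; cases h
      · rintro ⟨k, hk1, hk2, hm⟩
        cases k with
        | zero => omega
        | succ k => simp [pvMem, hf] at hm
    | some p =>
      obtain ⟨e, ch⟩ := p
      cases e with
      | true =>
        simp only [if_true]
        constructor
        · intro _
          exact ⟨1, le_refl 1, by simp, by simp [pvMem, hf]⟩
        · intro _; trivial
      | false =>
        simp only [Bool.false_eq_true, if_false]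
        rw [ih ch]
        constructor
        · rintro ⟨k, hk1, hk2, hm⟩
          refine ⟨k + 1, by omega, by simp; omega, ?_⟩
          have ht : (c :: rest).take (k + 1) = c :: rest.take k := rfl
          have hne : rest.take k ≠ [] := by
            rw [Ne, List.take_eq_nil_iff]
            rintro (h | h)
            · omega
            · subst h; simp at hk2; omega
          rw [ht]
          simp [pvMem, hf, hne, hm]
        · rintro ⟨k, hk1, hk2, hm⟩
          cases k with
          | zero => omega
          | succ k =>
            have ht : (c :: rest).take (k + 1) = c :: rest.take k := rfl
            rw [ht] at hm
            cases k with
            | zero => simp [pvMem, hf] at hm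
            | succ k2 =>
              have hne : rest.take (k2 + 1) ≠ [] := by
                rw [Ne, List.take_eq_nil_iff]
                rintro (h | h)
                · omega
                · subst h; simp at hk2
              simp only [pvMem, hf, if_neg hne] at hm
              exact ⟨k2 + 1, by omega, by simp at hk2 ⊢; omega, hm⟩

theorem cond_eq (t : PvTrie) (S : PySem.Set String)
    (h : ∀ w : String, pvMem t w.toList = PySem.Set.contains S w) (word : String) :
    (PySem.Str.len word == 1
      || (PySem.List.pyRange 1 (PySem.Str.len word)).any
           (fun i => PySem.Set.contains S (PySem.Str.slice word none (some i))))
    = (PySem.Str.len word == 1 || pvEndsBefore t word) := by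
  have key : (PySem.List.pyRange 1 (PySem.Str.len word)).any
      (fun i => PySem.Set.contains S (PySem.Str.slice word none (some i)))
      = pvEndsBefore t word := by
    rw [Bool.eq_iff_iff]
    rw [List.any_eq_true]
    unfold pvEndsBefore
    rw [pvWalk_iff]
    constructor
    · rintro ⟨i, hi, hc⟩
      rw [PySem.List.mem_pyRange_one] at hi
      rw [PySem.Str.len_eq] at hi
      refine ⟨i.toNat, by omega, ?_, ?_⟩
      · rw [List.length_dropLast]; omega
      · rw [List.dropLast_eq_take, List.take_take]
        have hmin : min i.toNat (word.toList.length - 1) = i.toNat := by omega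
        rw [hmin]
        rw [← h (PySem.Str.slice word none (some i))] at hc
        rw [PySem.Str.toList_slice, PySem.Chars.slice_eq_listSlice,
            PySem.List.slice_to _ (by omega : (0:Int) ≤ i)] at hc
        exact hc
    · rintro ⟨k, hk1, hk2, hm⟩
      rw [List.length_dropLast] at hk2
      refine ⟨(k : Int), ?_, ?_⟩
      · rw [PySem.List.mem_pyRange_one, PySem.Str.len_eq]
        constructor
        · exact_mod_cast hk1
        · have hlen : 1 ≤ word.toList.length := by omega
          exact_mod_cast (by omega : k < word.toList.length)
      · rw [← h (PySem.Str.slice word none (some (k : Int)))] at *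
        rw [PySem.Str.toList_slice, PySem.Chars.slice_eq_listSlice,
            PySem.List.slice_to _ (by omega : (0:Int) ≤ (k:Int))]
        rw [List.dropLast_eq_take, List.take_take] at hm
        have hmin : min k (word.toList.length - 1) = k := by omega
        rw [hmin] at hm
        simpa using hm
  rw [key]

theorem loop_inv (l : List String) : ∀ (S : PySem.Set String) (t : PvTrie) (p : List String),
    (∀ w : String, pvMem t w.toList = PySem.Set.contains S w) →
    (l.foldl
      (fun (st : PySem.Set String × List String) word =>
        if PySem.Str.len word == 1
           || (PySem.List.pyRange 1 (PySem.Str.len word)).any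
                (fun i => PySem.Set.contains st.1 (PySem.Str.slice word none (some i)))
        then (PySem.Set.add st.1 word, st.2 ++ [word])
        else st) (S, p)).2
    = (l.foldl
      (fun (st : PvTrie × List String) word =>
        if PySem.Str.len word == 1 || pvEndsBefore st.1 word
        then (pvInsert st.1 word.toList, st.2 ++ [word])
        else st) (t, p)).2 := by
  induction l with
  | nil => intro S t p _; rfl
  | cons word l ih =>
    intro S t p hinv
    rw [List.foldl_cons, List.foldl_cons]
    have hc := cond_eq t S hinv word
    cases hcb : (PySem.Str.len word == 1 || pvEndsBefore t word) with
    | false =>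
      have hA := hc.trans hcb
      simp only [hA, Bool.false_eq_true, if_false]
      exact ih S t p hinv
    | true =>
      have hA := hc.trans hcb
      -- the inserted word is nonempty
      have hne : word.toList ≠ [] := by
        rcases (Bool.or_eq_true _ _).mp hcb with h1 | h2
        · have : PySem.Str.len word = 1 := by simpa using h1
          rw [PySem.Str.len_eq] at this
          intro hnil
          rw [hnil] at this
          simp at this
        · unfold pvEndsBefore at h2
          rcases (pvWalk_iff _ t).mp h2 with ⟨k, hk1, hk2, -⟩
          rw [List.length_dropLast] at hk2
          intro hnil
          rw [hnil] at hk2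
          simp at hk2
          omega
      simp only [hA, if_true]
      apply ih
      intro u
      rw [pvMem_insert t word.toList hne u.toList, hinv u, Bool.eq_iff_iff]
      simp only [Bool.or_eq_true, decide_eq_true_eq, String.toList_inj,
        PySem.Set.contains_iff, PySem.Set.mem_add]
      tauto

-- ===== VERDICT (by name: the statement is the Claim_ definition above) =====
theorem longestWordWithPath_spec : Claim_equal_longestWordWithPath := by
  intro words _
  unfold Spec_longestWordWithPath longestWordWithPath longestWordWithPath_alt
  exact loop_inv _ PySem.Set.empty .nil []
    (fun w => by simp [pvMem_nil, PySem.Set.empty, PySem.Set.contains])
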